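-- pv_equiv track=rewrite | github.com/Adda0/optifa | src/optifa.py | solve_one_handle_longer
-- ===== SOURCE A (Python) =====
-- import math
--
-- def solve_one_handle_longer(fa_a_id, fa_b_id):
--     fa_a_id[0] -= fa_b_id[0]
--     fa_b_id[0] = 0
--
--     if fa_a_id[1] == 0 and fa_b_id[1] == 0:  # No loops.
--         return False
--
--     elif fa_b_id[1] == 0:
--         return False
--
--     elif fa_a_id[1] == 0:
--         curr_num = 0
--         while curr_num <= fa_a_id[0]:
--             if curr_num == fa_a_id[0]:
--                 return True
--             else:
--                 curr_num += fa_b_id[1]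
--         return False
--
--     else:  # Two loops:
--         gcd = math.gcd(fa_a_id[1], fa_b_id[1])
--         if gcd == 1:
--             return True
--         else:
--             y = - fa_a_id[0]
--             while y < gcd:
--                 y += fa_a_id[1]
--             if y % gcd == 0:
--                 return True
--             else:
--                 return False
-- ===== SOURCE B (Python) =====
-- import math
--
-- def solve_one_handle_longer(fa_a_id, fa_b_id):
--     fa_a_id[0] -= fa_b_id[0]
--     fa_b_id[0] = 0
--     d = fa_a_id[0]
--     a1 = fa_a_id[1]
--     b1 = fa_b_id[1]
--     if b1 == 0:
--         return False
--     if a1 == 0: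
--         return d >= 0 and d % b1 == 0
--     return d % math.gcd(a1, b1) == 0
-- ===== Notes on version B (the rewrite author's own statement) =====
-- stated objective: simpler
-- what changed: replaces both counting while-loops (stepping by the loop length until the offset is reached / the gcd is exceeded) with direct modulo/gcd divisibility checks on the offset
-- outside the precondition, e.g. on solve_one_handle_longer([5, 0], [0, -2]): A does not finish within the time limit, B returns False; on solve_one_handle_longer([0, -4], [1, 6]): A does not finish within the time limit, B returns False; on solve_one_handle_longer([0], [0]): A raises IndexError, B raises IndexError
import Mathlib
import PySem

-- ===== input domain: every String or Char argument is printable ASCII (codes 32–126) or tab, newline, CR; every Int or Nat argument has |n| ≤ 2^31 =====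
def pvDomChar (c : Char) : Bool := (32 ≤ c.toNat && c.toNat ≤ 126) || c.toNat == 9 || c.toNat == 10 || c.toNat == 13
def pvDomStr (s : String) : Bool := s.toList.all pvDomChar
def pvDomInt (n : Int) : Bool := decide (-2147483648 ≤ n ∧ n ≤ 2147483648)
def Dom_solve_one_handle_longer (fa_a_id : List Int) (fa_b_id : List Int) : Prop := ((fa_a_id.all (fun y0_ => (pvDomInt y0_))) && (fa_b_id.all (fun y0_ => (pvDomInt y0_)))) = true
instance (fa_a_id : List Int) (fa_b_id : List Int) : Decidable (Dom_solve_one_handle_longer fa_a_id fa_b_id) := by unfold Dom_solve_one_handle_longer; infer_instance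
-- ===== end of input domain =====

-- ===== PORT A =====
-- B replaces A's two counting while-loops with direct modulo/gcd divisibility checks on the offset (objective: simpler).
-- Both programs mutate fa_a_id[0] and fa_b_id[0] identically; the equivalence proved is about the return value.

-- while curr_num <= d: if curr_num == d: return True else curr_num += step; return False
-- (fuel only totalizes; under Pre_ it never runs out)
def pyA_loop1 : Nat → Int → Int → Int → Bool
  | 0, _, _, _ => false
  | n+1, curr, d, step =>
    if curr ≤ d then (if curr = d then true else pyA_loop1 n (curr + step) d step) else false

-- y = -d; while y < g: y += a1  (fuel only totalizes; under Pre_ it never runs out)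
def pyA_loop2 : Nat → Int → Int → Int → Int
  | 0, y, _, _ => y
  | n+1, y, g, a1 => if y < g then pyA_loop2 n (y + a1) g a1 else y

def solve_one_handle_longer (fa_a_id : List Int) (fa_b_id : List Int) : Bool :=
  let a0 := ((PySem.List.pyGet? fa_a_id 0).getD 0) - ((PySem.List.pyGet? fa_b_id 0).getD 0)
  let a1 := (PySem.List.pyGet? fa_a_id 1).getD 0
  let b1 := (PySem.List.pyGet? fa_b_id 1).getD 0
  if a1 = 0 ∧ b1 = 0 then false
  else if b1 = 0 then false
  else if a1 = 0 then pyA_loop1 (a0.toNat + 2) 0 a0 b1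
  else
    let g : Int := Int.gcd a1 b1
    if g = 1 then true
    else
      let y := pyA_loop2 ((g + a0).toNat + 1) (-a0) g a1
      if PySem.Int.mod y g = 0 then true else false

-- ===== PORT B =====
def solve_one_handle_longer_alt (fa_a_id : List Int) (fa_b_id : List Int) : Bool :=
  let d := ((PySem.List.pyGet? fa_a_id 0).getD 0) - ((PySem.List.pyGet? fa_b_id 0).getD 0)
  let a1 := (PySem.List.pyGet? fa_a_id 1).getD 0
  let b1 := (PySem.List.pyGet? fa_b_id 1).getD 0
  if b1 = 0 then false
  else if a1 = 0 then decide (0 ≤ d) && decide (PySem.Int.mod d b1 = 0)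
  else decide (PySem.Int.mod d ((Int.gcd a1 b1 : Nat) : Int) = 0)

-- ===== PRECONDITION & SPEC =====
-- Pre_ excludes only inputs on which A does NOT return: lists shorter than 2 (IndexError) and the
-- two parameter regions where A's while-loop steps by a nonpositive amount and never terminates.
def Pre_solve_one_handle_longer (fa_a_id : List Int) (fa_b_id : List Int) : Prop :=
  2 ≤ fa_a_id.length ∧ 2 ≤ fa_b_id.length ∧
  (let d := fa_a_id.getD 0 0 - fa_b_id.getD 0 0
   let a1 := fa_a_id.getD 1 0
   let b1 := fa_b_id.getD 1 0
   (a1 = 0 → b1 < 0 → d ≤ 0) ∧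
   (a1 < 0 → b1 ≠ 0 → ((Int.gcd a1 b1 : Nat) : Int) = 1 ∨ ((Int.gcd a1 b1 : Nat) : Int) ≤ -d))
instance (fa_a_id : List Int) (fa_b_id : List Int) : Decidable (Pre_solve_one_handle_longer fa_a_id fa_b_id) := by
  unfold Pre_solve_one_handle_longer; infer_instance

def pvWitness_solve_one_handle_longer : List Int × List Int := ([7, 0], [1, 3])

def Spec_solve_one_handle_longer (fa_a_id : List Int) (fa_b_id : List Int) (out : Bool) : Prop := out = solve_one_handle_longer_alt fa_a_id fa_b_id
instance (fa_a_id : List Int) (fa_b_id : List Int) (out : Bool) : Decidable (Spec_solve_one_handle_longer fa_a_id fa_b_id out) := by unfold Spec_solve_one_handle_longer; infer_instance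

-- ===== CLAIM (what is proved, stated in full; the proofs are below) =====
def Claim_equal_solve_one_handle_longer : Prop := ∀ (fa_a_id : List Int) (fa_b_id : List Int), Dom_solve_one_handle_longer fa_a_id fa_b_id → Pre_solve_one_handle_longer fa_a_id fa_b_id → Spec_solve_one_handle_longer fa_a_id fa_b_id (solve_one_handle_longer fa_a_id fa_b_id)

-- ===== LEMMAS AND PROOFS =====

-- Loop 1 with a positive step computes divisibility of the remaining offset.
theorem pyA_loop1_eq (fuel : Nat) (curr d step : Int) (hstep : 1 ≤ step)
    (hfuel : d - curr < (fuel : Int)) :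
    pyA_loop1 fuel curr d step = decide (curr ≤ d ∧ step ∣ (d - curr)) := by
  induction fuel generalizing curr with
  | zero =>
    have h : ¬ curr ≤ d := by omega
    simp [pyA_loop1, h]
  | succ n ih =>
    by_cases hle : curr ≤ d
    · by_cases heq : curr = d
      · subst heq; simp [pyA_loop1]
      · have hlt : curr < d := lt_of_le_of_ne hle heq
        have hstep1 : pyA_loop1 (n+1) curr d step = pyA_loop1 n (curr + step) d step := by
          simp [pyA_loop1, hle, heq]
        rw [hstep1, ih (curr + step) (by omega)]
        by_cases hdvd : step ∣ (d - curr)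
        · have h1 : step ∣ (d - (curr + step)) := by
            have he : d - (curr + step) = (d - curr) - step := by ring
            rw [he]; exact dvd_sub hdvd dvd_rfl
          have hge : step ≤ d - curr := Int.le_of_dvd (by omega) hdvd
          have hcs : curr + step ≤ d := by omega
          simp [hdvd, h1, hle, hcs]
        · have h1 : ¬ step ∣ (d - (curr + step)) := by
            intro h
            have he : d - curr = (d - (curr + step)) + step := by ring
            exact hdvd (he ▸ dvd_add h dvd_rfl)
          simp [hdvd, h1]
    · simp [pyA_loop1, hle]

-- Loop 2 only adds multiples of a1, so y mod g is preserved when g ∣ a1.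
theorem pyA_loop2_mod (fuel : Nat) (y g a1 : Int) (hdvd : g ∣ a1) :
    PySem.Int.mod (pyA_loop2 fuel y g a1) g = PySem.Int.mod y g := by
  induction fuel generalizing y with
  | zero => rfl
  | succ n ih =>
    by_cases h : y < g
    · rw [show pyA_loop2 (n+1) y g a1 = pyA_loop2 n (y + a1) g a1 from by simp [pyA_loop2, h],
        ih (y + a1)]
      obtain ⟨k, hk⟩ := hdvd
      subst hk
      unfold PySem.Int.mod
      simp
    · simp [pyA_loop2, h]

theorem pg0 (l : List Int) (h : 0 < l.length) :
    (PySem.List.pyGet? l 0).getD 0 = l.getD 0 0 := by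
  simp [PySem.List.pyGet?, PySem.List.pyIdx?, h]

theorem pg1 (l : List Int) (h : 1 < l.length) :
    (PySem.List.pyGet? l 1).getD 0 = l.getD 1 0 := by
  simp [PySem.List.pyGet?, PySem.List.pyIdx?, h]

-- The whole equivalence over the three extracted values.
theorem core (d a1 b1 : Int)
    (h1 : a1 = 0 → b1 < 0 → d ≤ 0)
    (h2 : a1 < 0 → b1 ≠ 0 → ((Int.gcd a1 b1 : Nat) : Int) = 1 ∨ ((Int.gcd a1 b1 : Nat) : Int) ≤ -d) :
    (if a1 = 0 ∧ b1 = 0 then false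
     else if b1 = 0 then false
     else if a1 = 0 then pyA_loop1 (d.toNat + 2) 0 d b1
     else if ((Int.gcd a1 b1 : Nat) : Int) = 1 then true
     else if PySem.Int.mod
         (pyA_loop2 ((((Int.gcd a1 b1 : Nat) : Int) + d).toNat + 1) (-d) ((Int.gcd a1 b1 : Nat) : Int) a1)
         ((Int.gcd a1 b1 : Nat) : Int) = 0 then true else false)
    = (if b1 = 0 then false
       else if a1 = 0 then decide (0 ≤ d) && decide (PySem.Int.mod d b1 = 0)
       else decide (PySem.Int.mod d ((Int.gcd a1 b1 : Nat) : Int) = 0)) := by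
  by_cases hb0 : b1 = 0
  · simp [hb0]
  · by_cases ha0 : a1 = 0
    · by_cases hbp : 1 ≤ b1
      · have hl := pyA_loop1_eq (d.toNat + 2) 0 d b1 hbp (by omega)
        simp [ha0, hb0, hl, PySem.Int.mod_eq_zero_iff_dvd]
      · have hbn : b1 < 0 := by omega
        have hdle : d ≤ 0 := h1 ha0 hbn
        by_cases hd0 : d = 0
        · subst hd0
          simp [ha0, hb0, pyA_loop1, PySem.Int.mod]
        · have hnl : ¬ (0 : Int) ≤ d := by omega
          have hl : pyA_loop1 (d.toNat + 2) 0 d b1 = false := by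
            simp [pyA_loop1, hnl]
          simp [ha0, hb0, hl, hnl]
    · have hgdvd : ((Int.gcd a1 b1 : Nat) : Int) ∣ a1 := Int.gcd_dvd_left a1 b1
      by_cases hg : ((Int.gcd a1 b1 : Nat) : Int) = 1
      · simp [ha0, hb0, hg]
      · have hloop := pyA_loop2_mod ((((Int.gcd a1 b1 : Nat) : Int) + d).toNat + 1)
          (-d) ((Int.gcd a1 b1 : Nat) : Int) a1 hgdvd
        have hmodneg : PySem.Int.mod (-d) ((Int.gcd a1 b1 : Nat) : Int) = 0
            ↔ PySem.Int.mod d ((Int.gcd a1 b1 : Nat) : Int) = 0 := by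
          rw [PySem.Int.mod_eq_zero_iff_dvd, PySem.Int.mod_eq_zero_iff_dvd]
          exact ⟨fun h => (neg_neg d) ▸ (dvd_neg.mpr h), fun h => dvd_neg.mpr h⟩
        have key : ((Int.gcd a1 b1 : Nat) : Int)
              ∣ pyA_loop2 ((((Int.gcd a1 b1 : Nat) : Int) + d).toNat + 1) (-d) ((Int.gcd a1 b1 : Nat) : Int) a1
            ↔ ((Int.gcd a1 b1 : Nat) : Int) ∣ d := by
          rw [← PySem.Int.mod_eq_zero_iff_dvd, ← PySem.Int.mod_eq_zero_iff_dvd, hloop]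
          exact hmodneg
        simp [ha0, hb0, hg, key]

-- ===== VERDICT (by name: the statement is the Claim_ definition above) =====
theorem solve_one_handle_longer_spec : Claim_equal_solve_one_handle_longer := by
  intro A B _ hpre
  obtain ⟨hA, hB, hpre⟩ := hpre
  simp only at hpre
  obtain ⟨h1, h2⟩ := hpre
  unfold Spec_solve_one_handle_longer solve_one_handle_longer solve_one_handle_longer_alt
  simp only [pg0 A (by omega), pg0 B (by omega), pg1 A (by omega), pg1 B (by omega)]
  exact core (A.getD 0 0 - B.getD 0 0) (A.getD 1 0) (B.getD 1 0) h1 h2
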